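-- pv_equiv track=rewrite | github.com/alikhreis7/PythonProjects | a4_part1.py | create_clean_sorted_nodupicates_list
-- ===== SOURCE A (Python) =====
-- def clean_word(word):
--     '''(str)->str
--     Returns a new string which is lowercase version of the given word
--     with special characters and digits removed
--
--     The returned word should not have any of the following characters:
--     ! . ? : , ' " - _ \ ( ) [ ] { } % 0 1 2 3 4 5 6 7 8 9 tab character and new-line character
--
--     >>> clean_word("co-operate.")
--     'cooperate'
--     >>> clean_word("Anti-viral drug remdesivir has little to no effect on Covid patients' chances of survival, a study from the World Health Organization (WHO) has found.")
--     'antiviral drug remdesivir has little to no effect on covid patients chances of survival a study from the world health organization who has found'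
--     >>> clean_word("1982")
--     ''
--     >>> clean_word("born_y1982_m08\n")
--     'bornym'
--     '''
--     temp = word
--     for i in range(0, len(word)):
--         if word[i] in "!.?:,\'\"-_\\()[]{}%0123456789\t\n":
--             temp=temp.replace(word[i],'')
--     return temp
--
-- def create_clean_sorted_nodupicates_list(s):
--     '''(str)->list of str
--     Given a string s representing a text, the function returns the list of words with the following properties:
--     - each word in the list is cleaned-up (no special characters nor numbers)
--     - there are no duplicated words in the list, and
--     - the list is sorted lexicographicaly (you can use python's .sort() list method or sorted() function.)
--
--     This function must call clean_word() function.
--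
--     You may find it helpful to first call s.split() to get a list version of s split on white space.
--
--     >>> create_clean_sorted_nodupicates_list('able "acre bale beyond" binary boat brainy care cat cater crate lawn\nlist race react cat sheet silt slit trace boat cat crate.\n')
--     ['able', 'acre', 'bale', 'beyond', 'binary', 'boat', 'brainy', 'care', 'cat', 'cater', 'crate', 'lawn', 'list', 'race', 'react', 'sheet', 'silt', 'slit', 'trace']
--
--     >>> create_clean_sorted_nodupicates_list('Across Europe, infection rates are rising, with Russia reporting a record 14,321 daily cases on Wednesday and a further 239 deaths.')
--     ['', 'a', 'across', 'and', 'are', 'cases', 'daily', 'deaths', 'europe', 'further', 'infection', 'on', 'rates', 'record', 'reporting', 'rising', 'russia', 'wednesday', 'with']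
--     '''
--
--     s = s.split()
--     newlist=[]
--     for i in (s):
--         if clean_word(i) not in newlist:
--             newlist.append(clean_word(i))
--     newlist.sort()
--     return(newlist)
-- ===== SOURCE B (Python) =====
-- SPECIAL = "!.?:,'\"-_\\()[]{}%0123456789\t\n"
--
--
-- def _clean(word):
--     return ''.join(c for c in word if c not in SPECIAL)
--
--
-- def create_clean_sorted_nodupicates_list(s):
--     cleaned = sorted(_clean(w) for w in s.split())
--     result = []
--     prev = None
--     for w in cleaned:
--         if w != prev:
--             result.append(w)
--             prev = w
--     return result
-- ===== Notes on version B (the rewrite author's own statement) =====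
-- stated objective: faster
-- what changed: B cleans each word once by a single filtering pass (instead of A's per-index replace loop that rescans the word), sorts the cleaned words first, and deduplicates by comparing each word with the previous one in the sorted order, removing A's O(n) membership scan of the growing result list for every word.
import Mathlib
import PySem

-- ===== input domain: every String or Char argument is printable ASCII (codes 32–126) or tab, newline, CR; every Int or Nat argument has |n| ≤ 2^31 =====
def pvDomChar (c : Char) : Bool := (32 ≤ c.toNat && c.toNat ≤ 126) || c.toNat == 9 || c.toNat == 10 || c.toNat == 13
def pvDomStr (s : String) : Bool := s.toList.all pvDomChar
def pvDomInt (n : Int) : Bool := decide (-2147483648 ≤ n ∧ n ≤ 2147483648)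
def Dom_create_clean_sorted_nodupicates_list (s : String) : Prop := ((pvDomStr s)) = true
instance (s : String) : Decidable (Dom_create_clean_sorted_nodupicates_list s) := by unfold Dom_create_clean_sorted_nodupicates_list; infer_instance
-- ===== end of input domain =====

-- B cleans each word by one filtering pass and deduplicates by adjacent comparison after
-- sorting, instead of A's per-index replace loop and per-word membership scan (objective: faster).

-- ===== PORT A =====
-- the characters of "!.?:,'\"-_\\()[]{}%0123456789\t\n"
def pvSpecialChars : List Char := "!.?:,'\"-_\\()[]{}%0123456789\t\n".toList

-- port of clean_word: temp starts as word; for each index i, if word[i] is in the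
-- special string, temp = temp.replace(word[i], '')
def clean_word (word : String) : String :=
  String.ofList ((PySem.List.pyRange 0 (PySem.Chars.len word.toList)).foldl
    (fun temp i =>
      match PySem.List.pyGet? word.toList i with
      | some c =>
          if PySem.Chars.isIn [c] pvSpecialChars then PySem.Chars.replace temp [c] [] else temp
      | none => temp)
    word.toList)

def create_clean_sorted_nodupicates_list (s : String) : List String :=
  let ws := PySem.Str.split₀ s
  let newlist := ws.foldl (fun nl w =>
      if clean_word w ∈ nl then nl else nl ++ [clean_word w]) []
  PySem.List.sorted newlist (fun x => x)

-- ===== PORT B =====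
-- port of _clean: keep exactly the characters not in SPECIAL
def clean_word_alt (word : String) : String :=
  String.ofList (word.toList.filter (fun c => !(PySem.Chars.isIn [c] pvSpecialChars)))

def create_clean_sorted_nodupicates_list_alt (s : String) : List String :=
  let cleaned := PySem.List.sorted ((PySem.Str.split₀ s).map clean_word_alt) (fun x => x)
  (cleaned.foldl (fun st w => if st.2 ≠ some w then (st.1 ++ [w], some w) else st)
    (([] : List String), (none : Option String))).1

-- ===== PRECONDITION & SPEC =====
def Spec_create_clean_sorted_nodupicates_list (s : String) (out : List String) : Prop := out = create_clean_sorted_nodupicates_list_alt s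
instance (s : String) (out : List String) : Decidable (Spec_create_clean_sorted_nodupicates_list s out) := by unfold Spec_create_clean_sorted_nodupicates_list; infer_instance

-- ===== CLAIM (what is proved, stated in full; the proofs are below) =====
def Claim_equal_create_clean_sorted_nodupicates_list : Prop := ∀ (s : String), Dom_create_clean_sorted_nodupicates_list s → Spec_create_clean_sorted_nodupicates_list s (create_clean_sorted_nodupicates_list s)

-- ===== LEMMAS AND PROOFS =====
set_option maxRecDepth 8192

-- replace with a one-character pattern and empty replacement is a filter
theorem pv_replace_go_filter (c : Char) :
    ∀ (fuel : Nat) (l acc : List Char), l.length ≤ fuel →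
      PySem.Chars.replace.go [c] [] fuel l acc = acc.reverse ++ l.filter (· ≠ c) := by
  intro fuel
  induction fuel with
  | zero =>
    intro l acc h
    have hl : l = [] := List.eq_nil_of_length_eq_zero (Nat.le_zero.mp h)
    subst hl
    simp [PySem.Chars.replace.go]
  | succ n ih =>
    intro l acc h
    cases l with
    | nil => simp [PySem.Chars.replace.go]
    | cons a t =>
      by_cases hca : c = a
      · subst hca
        simp only [PySem.Chars.replace.go, List.isPrefixOf, BEq.rfl, Bool.true_and,
          if_true]
        simp only [List.length_cons, List.drop_succ_cons, List.length_nil, List.drop_zero,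
          List.reverse_nil, List.nil_append]
        rw [ih t acc (by simpa using h)]
        simp
      · have hpf : List.isPrefixOf [c] (a :: t) = false := by
          simp [List.isPrefixOf, hca]
        simp only [PySem.Chars.replace.go, hpf, Bool.false_eq_true, if_false]
        rw [ih t (a :: acc) (by simpa using h)]
        simp [Ne.symm hca]

theorem pv_replace_singleton (cs : List Char) (c : Char) :
    PySem.Chars.replace cs [c] [] = cs.filter (· ≠ c) := by
  have h := pv_replace_go_filter c cs.length cs [] le_rfl
  simpa [PySem.Chars.replace] using h

-- the state of A's clean_word loop after the first n indices
theorem pv_clean_loop (cs : List Char) :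
    ∀ n, n ≤ cs.length →
      (List.range n).foldl
        (fun temp k =>
          match PySem.List.pyGet? cs ((k : Nat) : Int) with
          | some c =>
              if PySem.Chars.isIn [c] pvSpecialChars then PySem.Chars.replace temp [c] [] else temp
          | none => temp)
        cs
      = cs.filter (fun c => !(PySem.Chars.isIn [c] pvSpecialChars && (cs.take n).contains c)) := by
  intro n
  induction n with
  | zero => simp
  | succ n ih =>
    intro h
    have hn : n ≤ cs.length := Nat.le_of_succ_le h
    have hlt : n < cs.length := h
    rw [List.range_succ, List.foldl_append, ih hn]
    simp only [List.foldl_cons, List.foldl_nil]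
    have hget : PySem.List.pyGet? cs ((n : Nat) : Int) = some cs[n] := by
      simp [PySem.List.pyGet?_natCast, List.getElem?_eq_getElem hlt]
    rw [hget]
    dsimp only
    have htake : cs.take (n + 1) = cs.take n ++ [cs[n]] := by
      rw [List.take_add_one, List.getElem?_eq_getElem hlt]; rfl
    by_cases hsp : PySem.Chars.isIn [cs[n]] pvSpecialChars
    · rw [if_pos hsp, pv_replace_singleton, List.filter_filter]
      refine List.filter_congr ?_
      intro x _
      by_cases hx : x = cs[n]
      · subst hx
        rw [htake, List.contains_append]
        simp [hsp]
      · rw [htake, List.contains_append]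
        have hbx : ([cs[n]].contains x) = false := by
          simpa using hx
        rw [hbx]
        simp [decide_eq_true (show x ≠ cs[n] from hx)]
    · rw [if_neg hsp]
      refine List.filter_congr ?_
      intro x _
      by_cases hx : x = cs[n]
      · subst hx
        rw [htake, List.contains_append]
        simp [Bool.eq_false_iff.mpr hsp]
      · rw [htake, List.contains_append]
        have hbx : ([cs[n]].contains x) = false := by
          simpa using hx
        rw [hbx]
        simp

theorem pv_clean_eq (w : String) : clean_word w = clean_word_alt w := by
  unfold clean_word clean_word_alt
  have hlen : PySem.Chars.len w.toList = ((w.toList.length : Nat) : Int) := by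
    simp [PySem.Chars.len_eq]
  rw [hlen, PySem.List.pyRange_zero_natCast, List.foldl_map,
    pv_clean_loop w.toList w.toList.length le_rfl, List.take_length]
  congr 1
  refine List.filter_congr ?_
  intro x hx
  simp [hx]

-- A's dedup loop: result is duplicate-free and holds exactly the cleaned words
theorem pv_dedupA (ws : List String) :
    ∀ acc : List String, acc.Nodup →
      (ws.foldl (fun nl w => if clean_word w ∈ nl then nl else nl ++ [clean_word w]) acc).Nodup ∧
      ∀ x, x ∈ ws.foldl (fun nl w => if clean_word w ∈ nl then nl else nl ++ [clean_word w]) acc ↔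
        x ∈ acc ∨ x ∈ ws.map clean_word := by
  induction ws with
  | nil => intro acc hacc; simpa using hacc
  | cons w t ih =>
    intro acc hacc
    rw [List.foldl_cons]
    by_cases hm : clean_word w ∈ acc
    · rw [if_pos hm]
      obtain ⟨h1, h2⟩ := ih acc hacc
      refine ⟨h1, fun x => ?_⟩
      rw [h2 x]
      simp only [List.map_cons, List.mem_cons]
      constructor
      · rintro (h | h)
        · exact Or.inl h
        · exact Or.inr (Or.inr h)
      · rintro (h | h | h)
        · exact Or.inl h
        · exact Or.inl (h ▸ hm)
        · exact Or.inr h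
    · rw [if_neg hm]
      have hacc' : (acc ++ [clean_word w]).Nodup := by
        simp only [List.nodup_append, List.nodup_cons, List.not_mem_nil, not_false_eq_true,
          List.nodup_nil, and_true, true_and, hacc]
        intro a ha b hb
        rw [List.mem_singleton.mp hb]
        exact fun hae => hm (hae ▸ ha)
      obtain ⟨h1, h2⟩ := ih _ hacc'
      refine ⟨h1, fun x => ?_⟩
      rw [h2 x]
      simp [List.mem_append, or_assoc]

-- the adjacent-dedup pass of B, as a recursive function
def pvAdj (p : Option String) : List String → List String
  | [] => []
  | c :: t => if p ≠ some c then c :: pvAdj (some c) t else pvAdj p t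

theorem pv_foldlB_adj :
    ∀ (cs res : List String) (p : Option String),
      (cs.foldl (fun st w => if st.2 ≠ some w then (st.1 ++ [w], some w) else st) (res, p)).1
        = res ++ pvAdj p cs := by
  intro cs
  induction cs with
  | nil => intro res p; simp [pvAdj]
  | cons c t ih =>
    intro res p
    rw [List.foldl_cons]
    by_cases hp : p = some c
    · subst hp
      rw [show (if ((res, some c).2 ≠ some c) then ((res, some c).1 ++ [c], some c)
            else ((res, some c)) : List String × Option String) = (res, some c) by simp]
      rw [pvAdj, if_neg (by simp)]
      exact ih res (some c)
    · rw [show (if ((res, p).2 ≠ some c) then ((res, p).1 ++ [c], some c)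
            else ((res, p)) : List String × Option String) = (res ++ [c], some c) by simp [hp]]
      rw [ih (res ++ [c]) (some c), pvAdj, if_pos hp]
      simp

theorem pv_adj_mem (cs : List String) (p : Option String)
    (hs : cs.Pairwise (· ≤ ·)) (hp : ∀ q, p = some q → ∀ c ∈ cs, q ≤ c) :
    ∀ x, x ∈ pvAdj p cs ↔ x ∈ cs ∧ some x ≠ p := by
  induction cs generalizing p with
  | nil => intro x; simp [pvAdj]
  | cons c t ih =>
    have hc : ∀ y ∈ t, c ≤ y := (List.pairwise_cons.mp hs).1
    have hs' : t.Pairwise (· ≤ ·) := (List.pairwise_cons.mp hs).2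
    intro x
    by_cases hp0 : p = some c
    · rw [pvAdj, if_neg (by simp [hp0])]
      rw [ih p hs' (fun q hq y hy => by
        subst hp0; cases Option.some.inj hq; exact hc y hy) x]
      subst hp0
      constructor
      · rintro ⟨h1, h2⟩; exact ⟨List.mem_cons_of_mem _ h1, h2⟩
      · rintro ⟨h1, h2⟩
        rcases List.mem_cons.mp h1 with h | h
        · exact absurd (by rw [h]) h2
        · exact ⟨h, h2⟩
    · rw [pvAdj, if_pos (by simp [hp0])]
      rw [List.mem_cons, ih (some c) hs' (fun q hq y hy => by
        cases Option.some.inj hq; exact hc y hy) x]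
      constructor
      · rintro (h | ⟨h1, h2⟩)
        · exact ⟨by rw [h]; exact List.mem_cons_self .., by rw [h]; exact fun hh => hp0 hh.symm⟩
        · refine ⟨List.mem_cons_of_mem _ h1, ?_⟩
          intro hxp
          rcases hq : p with _ | q
          · rw [hq] at hxp; simp at hxp
          · rw [hq] at hxp
            have hxq : x = q := (Option.some.inj hxp.symm).symm
            have h1' : q ≤ x := hp q hq x (List.mem_cons_of_mem _ h1)
            have h2' : c ≤ x := hc x h1
            -- q = x and q ≤ c (since c ∈ cs) and c ≤ x = q forces c = q = x
            have hqc : q ≤ c := hp q hq c (List.mem_cons_self ..)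
            have : c = x := le_antisymm h2' (hxq ▸ hqc)
            exact h2 (by simp [this])
      · rintro ⟨h1, h2⟩
        rcases List.mem_cons.mp h1 with h | h
        · exact Or.inl h
        · by_cases hxc : x = c
          · exact Or.inl hxc
          · exact Or.inr ⟨h, by simp [hxc]⟩

theorem pv_adj_pairwise (cs : List String) (p : Option String)
    (hs : cs.Pairwise (· ≤ ·)) (hp : ∀ q, p = some q → ∀ c ∈ cs, q ≤ c) :
    (pvAdj p cs).Pairwise (· < ·) := by
  induction cs generalizing p with
  | nil => exact List.Pairwise.nil
  | cons c t ih =>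
    have hc : ∀ y ∈ t, c ≤ y := (List.pairwise_cons.mp hs).1
    have hs' : t.Pairwise (· ≤ ·) := (List.pairwise_cons.mp hs).2
    by_cases hp0 : p = some c
    · rw [pvAdj, if_neg (by simp [hp0])]
      exact ih p hs' (fun q hq y hy => by rw [hp0] at hq; cases Option.some.inj hq; exact hc y hy)
    · rw [pvAdj, if_pos (by simp [hp0])]
      refine List.pairwise_cons.mpr ⟨?_, ih (some c) hs' (fun q hq y hy => by
        cases Option.some.inj hq; exact hc y hy)⟩
      intro y hy
      have := (pv_adj_mem t (some c) hs' (fun q hq z hz => by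
        cases Option.some.inj hq; exact hc z hz) y).mp hy
      exact lt_of_le_of_ne (hc y this.1) (fun h => this.2 (by simp [h]))


-- ===== VERDICT (by name: the statement is the Claim_ definition above) =====
theorem create_clean_sorted_nodupicates_list_spec : Claim_equal_create_clean_sorted_nodupicates_list := by
  intro s _
  unfold Spec_create_clean_sorted_nodupicates_list
  unfold create_clean_sorted_nodupicates_list create_clean_sorted_nodupicates_list_alt
  have hmapeq : (PySem.Str.split₀ s).map clean_word_alt = (PySem.Str.split₀ s).map clean_word :=
    List.map_congr_left (fun w _ => (pv_clean_eq w).symm)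
  rw [hmapeq, pv_foldlB_adj]
  set ws := PySem.Str.split₀ s with hws
  set L := PySem.List.sorted (ws.map clean_word) (fun x => x) with hL
  have hsL : L.Pairwise (· ≤ ·) := PySem.List.sorted_pairwise _ _
  have hpnone : ∀ q, (none : Option String) = some q → ∀ c ∈ L, q ≤ c := by
    intro q hq; exact absurd hq (by simp)
  obtain ⟨hded1, hded2⟩ := pv_dedupA ws [] List.nodup_nil
  have hpw : (pvAdj none L).Pairwise (· < ·) := pv_adj_pairwise L none hsL hpnone
  have hnd : (pvAdj none L).Nodup := hpw.imp (fun h => ne_of_lt h)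
  have hperm : (pvAdj none L).Perm
      (ws.foldl (fun nl w => if clean_word w ∈ nl then nl else nl ++ [clean_word w]) []) := by
    rw [List.perm_ext_iff_of_nodup hnd hded1]
    intro x
    rw [pv_adj_mem L none hsL hpnone x, hded2 x, hL, PySem.List.mem_sorted]
    simp
  rw [List.nil_append]
  show PySem.List.sorted
      (ws.foldl (fun nl w => if clean_word w ∈ nl then nl else nl ++ [clean_word w]) [])
      (fun x => x) = pvAdj none L
  exact PySem.List.sorted_eq_of_perm_of_pairwise_lt _ _ _ hperm hpw
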